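-- pv_equiv track=rewrite | github.com/UserNameIlya/pythonProject | MadMax.py | MadMax
-- ===== SOURCE A (Python) =====
-- def MadMax(Tele:list):
--
--     #Отсортировать массив по возрастанию
--     def bubble_sort(Tele):
--         for bypass in range(1, len(Tele)):
--             for k in range(0,len(Tele)-bypass):
--                 if Tele[k] > Tele [k+1]:
--                         Tele[k], Tele[k+1] = Tele[k+1],Tele[k]
--         return Tele
--
--     #Сортируем вторую часть перестоновкой
--     def reverse_list(Tele):
--         #Находим центр
--         def get_center_index(Tele):
--             center_index = len(Tele)//2
--             return center_index
--
--         center_list = get_center_index(Tele)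
--
--         for i in range(1, len(Tele)-center_list):
--             for k in range(center_list,len(Tele)-i):
--                 if Tele[k] < Tele [k+1]:
--                         Tele[k], Tele[k+1] = Tele[k+1],Tele[k]
--         return Tele
--
--     #вернуть Tele
--     bubble_sort(Tele)
--     reverse_list(Tele)
--     return Tele
-- ===== SOURCE B (Python) =====
-- def MadMax(Tele: list):
--     s = sorted(Tele)
--     c = len(Tele) // 2
--     return s[:c] + s[c:][::-1]
-- ===== Notes on version B (the rewrite author's own statement) =====
-- stated objective: faster
-- what changed: Replaces two hand-written bubble-sort passes (ascending over the whole list, then descending over the second half) with one library sort plus a slice reversal; B does not mutate the argument in place as A does.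
import Mathlib
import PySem

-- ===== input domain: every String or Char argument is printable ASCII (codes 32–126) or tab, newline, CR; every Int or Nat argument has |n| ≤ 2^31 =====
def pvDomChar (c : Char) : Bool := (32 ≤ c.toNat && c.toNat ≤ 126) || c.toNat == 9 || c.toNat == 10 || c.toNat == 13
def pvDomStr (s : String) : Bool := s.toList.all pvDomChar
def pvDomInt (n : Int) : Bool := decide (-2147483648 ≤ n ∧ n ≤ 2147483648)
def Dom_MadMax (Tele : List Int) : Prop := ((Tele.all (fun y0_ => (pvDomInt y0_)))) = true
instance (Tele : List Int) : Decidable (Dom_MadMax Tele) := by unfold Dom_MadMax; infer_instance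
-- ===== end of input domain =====

-- B replaces A's two hand-written bubble-sort passes with one library sort plus a slice
-- reversal (objective: faster, asymptotic). A mutates its argument in place, B does not;
-- the equivalence proved here is about the RETURN value only.

-- ===== PORT A =====
-- 'Tele[k], Tele[k+1] = Tele[k+1], Tele[k]' guarded by 'if cmp Tele[k] Tele[k+1]':
-- the in-place adjacent swap at (nonnegative, as produced by range()) index k,
-- rendered structurally on the list; out-of-range k leaves the list unchanged,
-- exactly like the loop bounds never reaching such k in the Python.
def pvStepAt (cmp : Int → Int → Bool) : List Int → Nat → List Int
  | [], _ => []
  | [x], _ => [x]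
  | x :: y :: r, 0 => if cmp x y then y :: x :: r else x :: y :: r
  | x :: y :: r, k+1 => x :: pvStepAt cmp (y :: r) k

def MadMax (Tele : List Int) : List Int :=
  let n : Int := Tele.length
  -- bubble_sort(Tele): for bypass in range(1, n): for k in range(0, n - bypass): swap if >
  let t1 := (PySem.List.pyRange 1 n 1).foldl
      (fun acc bypass =>
        (PySem.List.pyRange 0 (n - bypass) 1).foldl
          (fun a k => pvStepAt (fun x y => decide (x > y)) a k.toNat) acc) Tele
  -- reverse_list(Tele): center = n // 2; for i in range(1, n - center): for k in range(center, n - i): swap if <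
  let c : Int := PySem.Int.floordiv n 2
  (PySem.List.pyRange 1 (n - c) 1).foldl
      (fun acc i =>
        (PySem.List.pyRange c (n - i) 1).foldl
          (fun a k => pvStepAt (fun x y => decide (x < y)) a k.toNat) acc) t1

-- ===== PORT B =====
-- s = sorted(Tele); c = len(Tele) // 2; return s[:c] + s[c:][::-1]
-- ('[::-1]' is List.reverse, cf. PySem.List.slice?_none_none_neg_one)
def MadMax_alt (Tele : List Int) : List Int :=
  let s := PySem.List.sorted Tele (fun x => x) false
  let c : Int := PySem.Int.floordiv (Tele.length : Int) 2
  PySem.List.slice s none (some c) ++ (PySem.List.slice s (some c) none).reverse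

-- ===== PRECONDITION & SPEC =====
def Spec_MadMax (Tele : List Int) (out : List Int) : Prop := out = MadMax_alt Tele
instance (Tele : List Int) (out : List Int) : Decidable (Spec_MadMax Tele out) := by unfold Spec_MadMax; infer_instance

-- ===== CLAIM (what is proved, stated in full; the proofs are below) =====
def Claim_equal_MadMax : Prop := ∀ (Tele : List Int), Dom_MadMax Tele → Spec_MadMax Tele (MadMax Tele)

-- ===== LEMMAS AND PROOFS =====

-- one bounded bubble pass: m adjacent comparisons from the front
def pvBPass (cmp : Int → Int → Bool) : Nat → List Int → List Int
  | 0, t => t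
  | _+1, [] => []
  | _+1, [x] => [x]
  | m+1, x :: y :: r => if cmp x y then y :: pvBPass cmp m (x :: r) else x :: pvBPass cmp m (y :: r)

-- passes of budgets m, m-1, …, 1
def pvSortN (cmp : Int → Int → Bool) : Nat → List Int → List Int
  | 0, t => t
  | m+1, t => pvSortN cmp m (pvBPass cmp (m+1) t)

theorem pvStepAt_succ (cmp : Int → Int → Bool) (x : Int) (l : List Int) (k : Nat) :
    pvStepAt cmp (x :: l) (k+1) = x :: pvStepAt cmp l k := by
  cases l with
  | nil => rfl
  | cons y r => rfl

theorem pvFoldlNil (cmp : Int → Int → Bool) (ks : List Int) :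
    ks.foldl (fun a k => pvStepAt cmp a k.toNat) [] = [] := by
  induction ks with
  | nil => rfl
  | cons k ks ih => simpa [pvStepAt] using ih

theorem pvFoldlSingle (cmp : Int → Int → Bool) (x : Int) (ks : List Int) :
    ks.foldl (fun a k => pvStepAt cmp a k.toNat) [x] = [x] := by
  induction ks with
  | nil => rfl
  | cons k ks ih =>
      have h : pvStepAt cmp [x] k.toNat = [x] := by cases k.toNat <;> rfl
      simpa [h] using ih

theorem pvShift (cmp : Int → Int → Bool) (b : Int) :
    ∀ (j : Nat) (a : Int), 0 ≤ a → (b - a).toNat = j → ∀ (x : Int) (l : List Int),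
      (PySem.List.pyRange (a+1) (b+1) 1).foldl (fun t k => pvStepAt cmp t k.toNat) (x :: l)
        = x :: (PySem.List.pyRange a b 1).foldl (fun t k => pvStepAt cmp t k.toNat) l := by
  intro j
  induction j with
  | zero =>
      intro a ha hj x l
      rw [PySem.List.pyRange_one_eq_nil (by omega), PySem.List.pyRange_one_eq_nil (by omega)]
      simp
  | succ j ih =>
      intro a ha hj x l
      have hab : a < b := by omega
      rw [PySem.List.pyRange_one_cons (by omega : a + 1 < b + 1),
          PySem.List.pyRange_one_cons hab]
      simp only [List.foldl_cons]
      have h1 : (a + 1).toNat = a.toNat + 1 := by omega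
      rw [h1, pvStepAt_succ]
      exact ih (a+1) (by omega) (by omega) x (pvStepAt cmp l a.toNat)

theorem pvInner (cmp : Int → Int → Bool) :
    ∀ (m : Nat) (t : List Int),
      (PySem.List.pyRange 0 (m : Int) 1).foldl (fun a k => pvStepAt cmp a k.toNat) t
        = pvBPass cmp m t := by
  intro m
  induction m with
  | zero => intro t; rw [PySem.List.pyRange_one_eq_nil (by omega)]; rfl
  | succ m ih =>
      intro t
      match t with
      | [] => rw [pvFoldlNil]; rfl
      | [x] => rw [pvFoldlSingle]; rfl
      | x :: y :: r =>
          rw [PySem.List.pyRange_one_cons (by push_cast; omega : (0:Int) < ((m+1 : Nat) : Int))]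
          simp only [List.foldl_cons]
          have h0 : pvStepAt cmp (x :: y :: r) (0:Int).toNat
              = if cmp x y then y :: x :: r else x :: y :: r := rfl
          rw [h0]
          have hcast : ((m + 1 : Nat) : Int) = (m : Int) + 1 := by push_cast; ring
          rw [hcast]
          split_ifs with hxy
          · rw [pvShift cmp (m : Int) m 0 (by omega) (by omega)]
            rw [ih (x :: r)]
            simp [pvBPass, hxy]
          · rw [pvShift cmp (m : Int) m 0 (by omega) (by omega)]
            rw [ih (y :: r)]
            simp [pvBPass, hxy]

theorem pvPrefix (cmp : Int → Int → Bool) :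
    ∀ (u : List Int) (a b : Int), 0 ≤ a → ∀ (l : List Int),
      (PySem.List.pyRange ((u.length : Int) + a) ((u.length : Int) + b) 1).foldl
          (fun t k => pvStepAt cmp t k.toNat) (u ++ l)
        = u ++ (PySem.List.pyRange a b 1).foldl (fun t k => pvStepAt cmp t k.toNat) l := by
  intro u
  induction u with
  | nil => intro a b ha l; simp
  | cons x u ih =>
      intro a b ha l
      have h1 : ((x :: u).length : Int) + a = ((u.length : Int) + a) + 1 := by
        simp [List.length_cons]; ring
      have h2 : ((x :: u).length : Int) + b = ((u.length : Int) + b) + 1 := by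
        simp [List.length_cons]; ring
      rw [h1, h2, List.cons_append,
          pvShift cmp ((u.length : Int) + b) ((((u.length : Int) + b) - ((u.length : Int) + a)).toNat)
            ((u.length : Int) + a) (by positivity) rfl]
      rw [ih a b ha l]; simp

theorem pvOuter (cmp : Int → Int → Bool) (u : List Int) (N : Int) :
    ∀ (j : Nat) (l : List Int),
      (PySem.List.pyRange (N - (j : Int)) N 1).foldl
          (fun acc i =>
            (PySem.List.pyRange ((u.length : Int)) ((u.length : Int) + (N - i)) 1).foldl
              (fun a k => pvStepAt cmp a k.toNat) acc) (u ++ l)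
        = u ++ pvSortN cmp j l := by
  intro j
  induction j with
  | zero =>
      intro l
      rw [PySem.List.pyRange_one_eq_nil (by omega)]
      rfl
  | succ j ih =>
      intro l
      rw [PySem.List.pyRange_one_cons (by push_cast; omega : N - ((j+1 : Nat) : Int) < N)]
      simp only [List.foldl_cons]
      have hNi : N - (N - ((j + 1 : Nat) : Int)) = ((j + 1 : Nat) : Int) := by ring
      rw [hNi]
      have hpre := pvPrefix cmp u 0 ((j + 1 : Nat) : Int) (by omega) l
      rw [add_zero] at hpre
      rw [hpre, pvInner cmp (j+1) l]
      have hrange : N - ((j + 1 : Nat) : Int) + 1 = N - (j : Int) := by push_cast; ring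
      rw [hrange]
      exact ih (pvBPass cmp (j+1) l)

theorem pvBPass_perm (cmp : Int → Int → Bool) :
    ∀ (m : Nat) (t : List Int), (pvBPass cmp m t).Perm t := by
  intro m
  induction m with
  | zero => intro t; rfl
  | succ m ih =>
      intro t
      match t with
      | [] => rfl
      | [x] => rfl
      | x :: y :: r =>
          simp only [pvBPass]
          split_ifs with h
          · exact ((ih (x :: r)).cons y).trans (List.Perm.swap x y r)
          · exact (ih (y :: r)).cons x

theorem pvBPass_length (cmp : Int → Int → Bool) (m : Nat) (t : List Int) :
    (pvBPass cmp m t).length = t.length := (pvBPass_perm cmp m t).length_eq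

theorem pvBPass_append (cmp : Int → Int → Bool) :
    ∀ (m : Nat) (u v : List Int), m + 1 ≤ u.length →
      pvBPass cmp m (u ++ v) = pvBPass cmp m u ++ v := by
  intro m
  induction m with
  | zero => intro u v _; rfl
  | succ m ih =>
      intro u v hu
      match u with
      | [] => simp at hu
      | [x] => simp at hu
      | x :: y :: r =>
          simp only [List.cons_append, pvBPass]
          split_ifs with h
          · rw [show x :: (r ++ v) = (x :: r) ++ v from rfl,
                ih (x :: r) v (by simp at hu ⊢; omega)]
            rfl
          · rw [show y :: (r ++ v) = (y :: r) ++ v from rfl,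
                ih (y :: r) v (by simp at hu ⊢; omega)]
            rfl

-- after one pass with enough budget, the list ends in an element that dominates every input element
theorem pvBPass_last (cmp : Int → Int → Bool)
    (hasym : ∀ x y, cmp x y = true → cmp y x = false)
    (htrans : ∀ x y z, cmp x y = false → cmp y z = false → cmp x z = false) :
    ∀ (m : Nat) (t : List Int), t ≠ [] → t.length ≤ m + 1 →
      ∃ u M, pvBPass cmp m t = u ++ [M] ∧ ∀ z ∈ t, cmp z M = false := by
  have hirr : ∀ x : Int, cmp x x = false := by
    intro x
    cases hx : cmp x x with
    | false => rfl
    | true => have h2 := hasym x x hx; rw [hx] at h2; exact h2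
  intro m
  induction m with
  | zero =>
      intro t ht hlen
      match t with
      | [] => exact absurd rfl ht
      | [x] => exact ⟨[], x, rfl, by simp [hirr]⟩
      | x :: y :: r => simp at hlen
  | succ m ih =>
      intro t ht hlen
      match t with
      | [] => exact absurd rfl ht
      | [x] => exact ⟨[], x, rfl, by simp [hirr]⟩
      | x :: y :: r =>
          simp only [pvBPass]
          split_ifs with h
          · obtain ⟨u, M, heq, hdom⟩ := ih (x :: r) (by simp) (by simp at hlen ⊢; omega)
            refine ⟨y :: u, M, by simp [heq], ?_⟩
            intro z hz
            rcases List.mem_cons.mp hz with rfl | hz2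
            · exact hdom z (by simp)
            rcases List.mem_cons.mp hz2 with rfl | hz3
            · exact htrans z x M (hasym x z h) (hdom x (by simp))
            · exact hdom z (by simp [hz3])
          · obtain ⟨u, M, heq, hdom⟩ := ih (y :: r) (by simp) (by simp at hlen ⊢; omega)
            refine ⟨x :: u, M, by simp [heq], ?_⟩
            intro z hz
            rcases List.mem_cons.mp hz with rfl | hz2
            · exact htrans z y M (by simpa using h) (hdom y (by simp))
            · exact hdom z hz2

theorem pvSortN_perm (cmp : Int → Int → Bool) :
    ∀ (m : Nat) (t : List Int), (pvSortN cmp m t).Perm t := by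
  intro m
  induction m with
  | zero => intro t; rfl
  | succ m ih =>
      intro t
      exact (ih (pvBPass cmp (m+1) t)).trans (pvBPass_perm cmp (m+1) t)

theorem pvSortN_append (cmp : Int → Int → Bool) :
    ∀ (m : Nat) (u v : List Int), m + 1 ≤ u.length →
      pvSortN cmp m (u ++ v) = pvSortN cmp m u ++ v := by
  intro m
  induction m with
  | zero => intro u v _; rfl
  | succ m ih =>
      intro u v hu
      simp only [pvSortN]
      rw [pvBPass_append cmp (m+1) u v hu,
          ih (pvBPass cmp (m+1) u) v (by rw [pvBPass_length]; omega)]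

theorem pvSortN_sorted (cmp : Int → Int → Bool)
    (hasym : ∀ x y, cmp x y = true → cmp y x = false)
    (htrans : ∀ x y z, cmp x y = false → cmp y z = false → cmp x z = false) :
    ∀ (m : Nat) (t : List Int), t.length ≤ m + 1 →
      (pvSortN cmp m t).Pairwise (fun a b => cmp a b = false) := by
  intro m
  induction m with
  | zero =>
      intro t hlen
      match t with
      | [] => simp [pvSortN]
      | [x] => simp [pvSortN]
      | x :: y :: r => simp at hlen
  | succ m ih =>
      intro t hlen
      simp only [pvSortN]
      by_cases hsmall : t.length ≤ m + 1
      · exact ih (pvBPass cmp (m+1) t) (by rw [pvBPass_length]; omega)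
      · have hlen' : t.length = m + 2 := by omega
        have ht : t ≠ [] := by intro h; rw [h] at hlen'; simp at hlen'
        obtain ⟨u, M, heq, hdom⟩ := pvBPass_last cmp hasym htrans (m+1) t ht (by omega)
        have hulen : u.length = m + 1 := by
          have := pvBPass_length cmp (m+1) t
          rw [heq] at this; simp at this; omega
        rw [heq, pvSortN_append cmp m u [M] (by omega)]
        rw [List.pairwise_append]
        refine ⟨ih u (by omega), by simp, ?_⟩
        intro a ha b hb
        rcases List.mem_singleton.mp hb with rfl
        have hau : a ∈ u := (pvSortN_perm cmp m u).mem_iff.mp ha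
        have hat : a ∈ t := by
          have : a ∈ pvBPass cmp (m+1) t := by rw [heq]; simp [hau]
          exact (pvBPass_perm cmp (m+1) t).mem_iff.mp this
        exact hdom a hat

-- the two comparison functions used by A
theorem pvGT_asym : ∀ x y : Int, (decide (x > y)) = true → (decide (y > x)) = false := by
  intro x y h; simp at h ⊢; omega
theorem pvGT_trans : ∀ x y z : Int, (decide (x > y)) = false → (decide (y > z)) = false →
    (decide (x > z)) = false := by
  intro x y z h1 h2; simp at h1 h2 ⊢; omega
theorem pvLT_asym : ∀ x y : Int, (decide (x < y)) = true → (decide (y < x)) = false := by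
  intro x y h; simp at h ⊢; omega
theorem pvLT_trans : ∀ x y z : Int, (decide (x < y)) = false → (decide (y < z)) = false →
    (decide (x < z)) = false := by
  intro x y z h1 h2; simp at h1 h2 ⊢; omega

-- ===== VERDICT (by name: the statement is the Claim_ definition above) =====
theorem MadMax_spec : Claim_equal_MadMax := by
  unfold Claim_equal_MadMax Spec_MadMax
  intro Tele _
  by_cases hne : Tele = []
  · subst hne; decide
  · have hlen : 1 ≤ Tele.length := List.length_pos_iff.mpr hne
    have hn1 : (1:Int) ≤ (Tele.length : Int) := by exact_mod_cast hlen
    simp only [MadMax, MadMax_alt]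
    set n : Int := (Tele.length : Int) with hn
    set c : Int := PySem.Int.floordiv n 2 with hcdef
    have hc2 : c = n / 2 := by rw [hcdef]; exact PySem.Int.floordiv_eq_ediv_of_pos (by norm_num)
    have hc0 : 0 ≤ c := by omega
    have hcn : c ≤ n - 1 := by omega
    set S : List Int := PySem.List.sorted Tele (fun x => x) false with hSdef
    have hSlen : S.length = Tele.length := by rw [hSdef]; exact PySem.List.length_sorted Tele (fun x => x) false
    -- phase 1: the first double loop is pvSortN with comparison (>)
    have h1 := pvOuter (fun x y => decide (x > y)) [] n (n-1).toNat Tele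
    rw [show ((n-1).toNat : Int) = n - 1 by omega] at h1
    simp only [List.length_nil, Nat.cast_zero, zero_add, List.nil_append, sub_sub_cancel] at h1
    -- and its result is the sorted list S
    have hS1 : pvSortN (fun x y => decide (x > y)) (n-1).toNat Tele = S := by
      rw [hSdef]
      refine (PySem.List.sorted_id_eq_of_perm_of_pairwise _ _ (pvSortN_perm _ _ Tele) ?_).symm
      exact (pvSortN_sorted _ pvGT_asym pvGT_trans (n-1).toNat Tele (by omega)).imp
        (fun h => by simp only [decide_eq_false_iff_not, not_lt] at h; exact h)
    -- phase 2: the second double loop keeps the first c elements and runs pvSortN with (<) on the rest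
    set u := S.take c.toNat with hu
    set l := S.drop c.toNat with hl
    have hul : (u.length : Int) = c := by rw [hu]; simp only [List.length_take]; omega
    have hllen : l.length = S.length - c.toNat := by rw [hl]; exact List.length_drop
    have h2 := pvOuter (fun x y => decide (x < y)) u (n - c) ((n - c - 1).toNat) l
    rw [show (((n - c - 1).toNat) : Int) = n - c - 1 by omega, hul] at h2
    simp only [sub_sub_cancel] at h2
    have harith : ∀ i : Int, c + (n - c - i) = n - i := fun i => by ring
    simp only [harith] at h2
    rw [show u ++ l = S by rw [hu, hl]; exact List.take_append_drop _ _] at h2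
    -- descending bubble on the (ascending) tail is exactly its reversal
    have hld : pvSortN (fun x y => decide (x < y)) (n - c - 1).toNat l = l.reverse := by
      have hps : S.Pairwise (fun a b : Int => a ≤ b) := by
        rw [hSdef]; exact PySem.List.sorted_pairwise Tele (fun x => x)
      have hpl : l.Pairwise (fun a b : Int => a ≤ b) := by
        rw [hl]; exact List.Pairwise.sublist (List.drop_sublist _ _) hps
      refine List.Perm.eq_of_pairwise (le := fun a b : Int => b ≤ a)
        (fun a b _ _ hab hba => le_antisymm hba hab) ?_ ?_
        ((pvSortN_perm _ _ l).trans l.reverse_perm.symm)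
      · exact (pvSortN_sorted _ pvLT_asym pvLT_trans (n - c - 1).toNat l (by omega)).imp
          (fun h => by simp only [decide_eq_false_iff_not, not_lt] at h; exact h)
      · exact List.pairwise_reverse.mpr (hpl.imp (fun h => h))
    -- assemble
    rw [h1, hS1, h2, hld,
        PySem.List.slice_to S hc0, PySem.List.slice_from S hc0, ← hu, ← hl]
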